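-- pv_equiv track=rewrite | github.com/openai/parameter-golf | scripts/causal/gradient_attribution.py | find_last_accumulate_flat_grads
-- ===== SOURCE A (Python) =====
-- def find_last_accumulate_flat_grads(source: str) -> tuple[int, str]:
--     """Find the LAST occurrence of accumulate_flat_grads call in source.
--
--     Returns (line_index, line_text) where line_index is 0-based.
--     Skips the function definition (lines starting with 'def ').
--     """
--     lines = source.splitlines()
--     last_idx = -1
--     last_line = ""
--     for i, line in enumerate(lines):
--         stripped = line.strip()
--         if "accumulate_flat_grads" in stripped and not stripped.startswith("def "):
--             last_idx = i
--             last_line = line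
--     if last_idx < 0:
--         raise ValueError("Could not find any accumulate_flat_grads call site in source")
--     return last_idx, last_line
-- ===== SOURCE B (Python) =====
-- def find_last_accumulate_flat_grads(source: str) -> tuple[int, str]:
--     """Scan the lines in reverse and return at the first match (= last forward match)."""
--     lines = source.splitlines()
--     for i in range(len(lines) - 1, -1, -1):
--         stripped = lines[i].strip()
--         if "accumulate_flat_grads" in stripped and not stripped.startswith("def "):
--             return i, lines[i]
--     raise ValueError("Could not find any accumulate_flat_grads call site in source")
-- ===== Notes on version B (the rewrite author's own statement) =====
-- stated objective: alternative
-- what changed: B scans the lines in reverse and returns immediately at the first match instead of A's forward pass that keeps overwriting a running last-match accumulator.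
import Mathlib
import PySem

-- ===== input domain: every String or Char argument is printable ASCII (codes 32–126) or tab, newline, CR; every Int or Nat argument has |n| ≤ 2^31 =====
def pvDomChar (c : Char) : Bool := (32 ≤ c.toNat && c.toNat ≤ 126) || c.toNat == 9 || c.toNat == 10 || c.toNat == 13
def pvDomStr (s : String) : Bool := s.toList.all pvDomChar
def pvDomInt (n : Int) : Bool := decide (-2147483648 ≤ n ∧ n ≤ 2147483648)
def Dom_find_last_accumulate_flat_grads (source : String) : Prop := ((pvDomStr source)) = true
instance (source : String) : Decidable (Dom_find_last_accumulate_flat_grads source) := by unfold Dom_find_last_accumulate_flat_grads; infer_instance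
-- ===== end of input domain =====

-- B scans the lines in reverse and returns at the first match instead of A's forward
-- pass with a running last-match accumulator; equal value, same ValueError cases (excluded by Pre_).

-- the shared line test: "accumulate_flat_grads" in line.strip() and not line.strip().startswith("def ")
def pvLineMatch (line : String) : Bool :=
  let stripped := PySem.Str.strip line
  PySem.Str.isIn "accumulate_flat_grads" stripped && !(PySem.Str.startswith stripped "def ")

-- ===== PORT A =====
def find_last_accumulate_flat_grads (source : String) : Int × String :=
  let lines := PySem.Str.splitlines source
  -- for i, line in enumerate(lines): if match: last_idx, last_line = i, line
  (PySem.List.enumerate lines).foldl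
    (fun acc p => if pvLineMatch p.2 then (p.1, p.2) else acc) (-1, "")
  -- 'if last_idx < 0: raise ValueError' — excluded by Pre_

-- ===== PORT B =====
-- for i in range(len(lines)-1, -1, -1): test lines[i], return at first hit
def pvRevScan : List (Int × String) → Int × String
  | [] => (-1, "")      -- unreachable under Pre_ (Python raises ValueError here)
  | p :: rest => if pvLineMatch p.2 then (p.1, p.2) else pvRevScan rest

def find_last_accumulate_flat_grads_alt (source : String) : Int × String :=
  let lines := PySem.Str.splitlines source
  pvRevScan (PySem.List.enumerate lines).reverse

-- ===== PRECONDITION & SPEC =====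
-- Pre_ excludes exactly the inputs where both Pythons raise ValueError: no line matches.
def Pre_find_last_accumulate_flat_grads (source : String) : Prop :=
  (PySem.Str.splitlines source).any pvLineMatch = true
instance (source : String) : Decidable (Pre_find_last_accumulate_flat_grads source) := by
  unfold Pre_find_last_accumulate_flat_grads; infer_instance

def pvWitness_find_last_accumulate_flat_grads : String := "accumulate_flat_grads(g)"

def Spec_find_last_accumulate_flat_grads (source : String) (out : Int × String) : Prop := out = find_last_accumulate_flat_grads_alt source
instance (source : String) (out : Int × String) : Decidable (Spec_find_last_accumulate_flat_grads source out) := by unfold Spec_find_last_accumulate_flat_grads; infer_instance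

-- ===== CLAIM (what is proved, stated in full; the proofs are below) =====
def Claim_equal_find_last_accumulate_flat_grads : Prop := ∀ (source : String), Dom_find_last_accumulate_flat_grads source → Pre_find_last_accumulate_flat_grads source → Spec_find_last_accumulate_flat_grads source (find_last_accumulate_flat_grads source)

-- ===== LEMMAS AND PROOFS =====

-- A's forward accumulator fold equals B's reverse first-hit scan (or the initial
-- accumulator when nothing matches), for any list of (index, line) pairs.
theorem pv_fold_eq_revScan (xs : List (Int × String)) (acc : Int × String) :
    xs.foldl (fun acc p => if pvLineMatch p.2 then (p.1, p.2) else acc) acc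
      = if xs.any (fun p => pvLineMatch p.2) then pvRevScan xs.reverse else acc := by
  induction xs using List.reverseRecOn generalizing acc with
  | nil => simp
  | append_singleton xs x ih =>
      rw [List.foldl_append, List.foldl_cons, List.foldl_nil, List.reverse_append]
      simp only [List.any_append, List.any_cons, List.any_nil, List.reverse_cons,
        List.reverse_nil, List.nil_append, List.singleton_append, pvRevScan]
      by_cases h : pvLineMatch x.2
      · simp [h]
      · have h' : pvLineMatch x.2 = false := by simpa using h
        rw [ih, h', Bool.or_false, Bool.or_false]
        simp

theorem pv_any_enumerate (lines : List String) :
    (PySem.List.enumerate lines).any (fun p => pvLineMatch p.2) = lines.any pvLineMatch := by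
  conv_rhs => rw [← PySem.List.map_snd_enumerate lines 0]
  rw [List.any_map]
  rfl

-- ===== VERDICT (by name: the statement is the Claim_ definition above) =====
theorem find_last_accumulate_flat_grads_spec : Claim_equal_find_last_accumulate_flat_grads := by
  intro source _ hpre
  unfold Spec_find_last_accumulate_flat_grads
  unfold find_last_accumulate_flat_grads find_last_accumulate_flat_grads_alt
  rw [pv_fold_eq_revScan, pv_any_enumerate]
  unfold Pre_find_last_accumulate_flat_grads at hpre
  rw [hpre]
  simp
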